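-- pv_equiv track=rewrite | github.com/Priyanka-125/LeetCode-Solutions | Minimum indexed character - GFG/minimum-indexed-character.py | minIndexChar
-- ===== SOURCE A (Python) =====
-- def minIndexChar(Str, pat):
--     #code here
--     p = []
--     for i in pat:
--         if i in Str:
--             p.append(Str.index(i))
--     if len(p)>0:
--         return min(p)
--     else:
--         return -1
-- ===== SOURCE B (Python) =====
-- def minIndexChar(Str, pat):
--     S = set(pat)
--     for i, c in enumerate(Str):
--         if c in S:
--             return i
--     return -1
-- ===== Notes on version B (the rewrite author's own statement) =====
-- stated objective: faster
-- what changed: Instead of collecting Str.index(c) for every pat character and taking min, B builds a set of pat's characters once and scans Str left-to-right, returning the first index whose character is in the set.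
import Mathlib
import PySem

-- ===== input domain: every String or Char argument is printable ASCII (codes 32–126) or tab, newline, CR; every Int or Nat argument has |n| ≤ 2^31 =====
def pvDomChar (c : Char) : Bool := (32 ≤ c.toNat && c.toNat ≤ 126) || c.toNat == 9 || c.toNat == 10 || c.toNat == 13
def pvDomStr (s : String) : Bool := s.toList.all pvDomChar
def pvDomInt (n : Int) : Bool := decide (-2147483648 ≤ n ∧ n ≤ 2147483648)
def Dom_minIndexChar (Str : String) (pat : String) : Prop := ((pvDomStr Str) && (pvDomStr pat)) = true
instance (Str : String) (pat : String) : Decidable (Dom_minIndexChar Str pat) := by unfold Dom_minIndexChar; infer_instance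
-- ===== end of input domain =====

-- B replaces A's per-pat-character scans of Str (collect Str.index(c), take min)
-- by one left-to-right scan of Str against a set of pat's characters (objective: faster).

-- ===== PORT A =====
-- literal port of A: collect Str.index(i) for each pat char present in Str, then min or -1
def minIndexChar (Str : String) (pat : String) : Int :=
  let p := pat.toList.foldl
    (fun acc c =>
      if PySem.Chars.isIn [c] Str.toList then acc ++ [PySem.Chars.find Str.toList [c]] else acc)
    []
  if 0 < p.length then (PySem.List.min? p (fun x => x)).getD (-1) else -1
  -- `.getD (-1)` only totalises min?: under the `0 < p.length` guard min? is always `some`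

-- ===== PORT B =====
-- the enumerate loop with early return, as structural recursion carrying the index i
def minIndexCharAltGo (S : PySem.Set Char) : List Char → Int → Int
  | [], _ => -1
  | c :: rest, i => if S.contains c then i else minIndexCharAltGo S rest (i + 1)

def minIndexChar_alt (Str : String) (pat : String) : Int :=
  minIndexCharAltGo (PySem.Set.ofList pat.toList) Str.toList 0

-- ===== PRECONDITION & SPEC =====
def Spec_minIndexChar (Str : String) (pat : String) (out : Int) : Prop := out = minIndexChar_alt Str pat
instance (Str : String) (pat : String) (out : Int) : Decidable (Spec_minIndexChar Str pat out) := by unfold Spec_minIndexChar; infer_instance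

-- ===== CLAIM (what is proved, stated in full; the proofs are below) =====
def Claim_equal_minIndexChar : Prop := ∀ (Str : String) (pat : String), Dom_minIndexChar Str pat → Spec_minIndexChar Str pat (minIndexChar Str pat)

-- ===== LEMMAS AND PROOFS =====

-- least-index property of idxOf
lemma idxOf_le_of_getElem (s : List Char) (c : Char) (j : Nat) (hj : j < s.length) (h : s[j] = c) :
    s.idxOf c ≤ j := by
  induction s generalizing j with
  | nil => simp at hj
  | cons a t ih =>
    rw [List.idxOf_cons]
    cases j with
    | zero => simp_all
    | succ k =>
      by_cases hac : a == c
      · simp [hac]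
      · simp only [hac, cond_false]
        have := ih k (by simpa using hj) (by simpa using h)
        omega

-- single-char membership: `c in s` ↔ c ∈ s
lemma isIn_singleton_iff (c : Char) (s : List Char) :
    PySem.Chars.isIn [c] s = true ↔ c ∈ s := by
  rw [PySem.Chars.isIn_iff_infix]
  constructor
  · intro h; exact h.subset (List.mem_singleton_self c)
  · intro h
    obtain ⟨l₁, l₂, rfl⟩ := List.append_of_mem h
    exact ⟨l₁, l₂, by simp⟩

-- find of a present single character is idxOf
lemma find_singleton_eq_idxOf (c : Char) (s : List Char) (h : c ∈ s) :
    PySem.Chars.find s [c] = (s.idxOf c : Int) := by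
  have hne : PySem.Chars.find s [c] ≠ -1 := by
    rw [Ne, PySem.Chars.find_eq_neg_one_iff, not_not]
    obtain ⟨l₁, l₂, rfl⟩ := List.append_of_mem h
    exact ⟨l₁, l₂, by simp⟩
  have hspec := PySem.Chars.findFrom_natCast_spec s [c] 0 (Nat.zero_le _)
    (by rwa [Nat.cast_zero, PySem.Chars.findFrom_zero])
  rw [Nat.cast_zero, PySem.Chars.findFrom_zero] at hspec
  obtain ⟨hge, hpre, hmin⟩ := hspec
  set f := PySem.Chars.find s [c] with hf
  have hget : s[f.toNat]? = some c := by
    obtain ⟨t2, ht⟩ := hpre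
    have : (List.drop f.toNat s).head? = some c := by rw [← ht]; rfl
    rwa [List.head?_drop] at this
  obtain ⟨hflt, hval⟩ := List.getElem?_eq_some_iff.mp hget
  have h1 : s.idxOf c ≤ f.toNat := idxOf_le_of_getElem s c f.toNat hflt hval
  have h2 : ¬ (s.idxOf c < f.toNat) := by
    intro hlt
    apply hmin (s.idxOf c) (Nat.zero_le _) hlt
    have hil : s.idxOf c < s.length := List.idxOf_lt_length_iff.mpr h
    refine ⟨List.drop (s.idxOf c + 1) s, ?_⟩
    rw [List.singleton_append]
    rw [List.drop_eq_getElem_cons hil, List.getElem_idxOf hil]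
  have : f.toNat = s.idxOf c := by omega
  omega

-- A's list p in closed form
lemma pA_eq (s pl : List Char) :
    pl.foldl (fun acc c => if PySem.Chars.isIn [c] s then acc ++ [PySem.Chars.find s [c]] else acc) []
      = (pl.filter (fun c => s.contains c)).map (fun c => (s.idxOf c : Int)) := by
  rw [PySem.List.foldl_append_if]
  simp only [List.nil_append]
  have hfil : pl.filter (fun c => PySem.Chars.isIn [c] s) = pl.filter (fun c => s.contains c) := by
    refine List.filter_congr (fun c _ => ?_)
    rw [Bool.eq_iff_iff]
    simp [isIn_singleton_iff]
  rw [hfil]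
  refine List.map_congr_left (fun c hc => ?_)
  have hcs : c ∈ s := by simpa using List.of_mem_filter hc
  exact find_singleton_eq_idxOf c s hcs

-- min? commutes with (+1)
lemma min?_map_add_one (q : List Int) :
    PySem.List.min? (q.map (fun x => x + 1)) (fun x => x)
      = (PySem.List.min? q (fun x => x)).map (fun x => x + 1) := by
  cases q with
  | nil => simp [PySem.List.min?]
  | cons x t =>
    rw [List.map_cons, PySem.List.min?_id_cons, PySem.List.min?_id_cons]
    simp only [Option.map_some]
    congr 1
    induction t generalizing x with
    | nil => rfl
    | cons y r ih =>
      simp only [List.map_cons, List.foldl_cons]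
      rw [show min (x + 1) (y + 1) = min x y + 1 by omega, ih]

-- the loop's result is -1 or at least the starting counter
lemma altGo_nonneg (S : PySem.Set Char) (t : List Char) (i : Int) (hi : 0 ≤ i) :
    minIndexCharAltGo S t i = -1 ∨ i ≤ minIndexCharAltGo S t i := by
  induction t generalizing i with
  | nil => left; rfl
  | cons c r ih =>
    by_cases hc : c ∈ S
    · right; simp [minIndexCharAltGo, hc]
    · have := ih (i + 1) (by omega)
      simp only [minIndexCharAltGo, PySem.Set.contains_eq_listContains] at *
      simp only [List.contains_iff_mem, hc, if_false]
      omega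

-- shift lemma for the scanning loop
lemma altGo_shift (S : PySem.Set Char) (t : List Char) (i : Int) :
    minIndexCharAltGo S t i
      = if minIndexCharAltGo S t 0 = -1 then -1 else minIndexCharAltGo S t 0 + i := by
  induction t generalizing i with
  | nil => simp [minIndexCharAltGo]
  | cons c r ih =>
    by_cases hc : c ∈ S
    · simp [minIndexCharAltGo, hc]
    · have h1 := ih (i + 1)
      have h0 := ih 1
      have hnn := altGo_nonneg S r 0 le_rfl
      have hcc : ¬ (S.contains c = true) := fun h => hc ((PySem.Set.contains_iff S c).mp h)
      simp only [minIndexCharAltGo, if_neg hcc]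
      rw [show (0 : Int) + 1 = 1 from rfl, h1, h0]
      split_ifs with h <;> omega

-- the main induction
lemma core_eq (pl : List Char) (s : List Char) :
    (let p := (pl.filter (fun c => s.contains c)).map (fun c => (s.idxOf c : Int));
     if 0 < p.length then (PySem.List.min? p (fun x => x)).getD (-1) else (-1 : Int))
      = minIndexCharAltGo (PySem.Set.ofList pl) s 0 := by
  simp only []
  induction s with
  | nil => simp [minIndexCharAltGo]
  | cons c t ih =>
    by_cases hc : c ∈ pl
    · -- first character of Str is in pat: both sides are 0
      have hSc : (PySem.Set.ofList pl).contains c = true :=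
        (PySem.Set.contains_iff _ _).mpr ((PySem.Set.mem_ofList pl c).mpr hc)
      have hcf : c ∈ pl.filter (fun d => (c :: t).contains d) :=
        List.mem_filter.mpr ⟨hc, by simp⟩
      have h0 : (0 : Int) ∈ (pl.filter (fun d => (c :: t).contains d)).map
          (fun d => ((c :: t).idxOf d : Int)) :=
        List.mem_map.mpr ⟨c, hcf, by simp⟩
      have hlen : 0 < ((pl.filter (fun d => (c :: t).contains d)).map
          (fun d => ((c :: t).idxOf d : Int))).length :=
        List.length_pos_iff.mpr (List.ne_nil_of_mem h0)
      rw [if_pos hlen]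
      cases hmin : PySem.List.min? ((pl.filter (fun d => (c :: t).contains d)).map
          (fun d => ((c :: t).idxOf d : Int))) (fun x => x) with
      | none =>
        exact absurd ((PySem.List.min?_eq_none_iff _ _).mp hmin)
          (List.ne_nil_of_mem h0)
      | some m =>
        have hm0 : m ≤ 0 := PySem.List.min?_isMin hmin 0 h0
        have hmem := PySem.List.min?_mem hmin
        obtain ⟨d, _, rfl⟩ := List.mem_map.mp hmem
        simp only [minIndexCharAltGo, if_pos hSc, Option.getD_some]
        omega
    · -- first character of Str is not in pat: peel it off and shift by one
      have hSc : ¬ ((PySem.Set.ofList pl).contains c = true) := fun h =>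
        hc ((PySem.Set.mem_ofList pl c).mp ((PySem.Set.contains_iff _ _).mp h))
      have hfil : pl.filter (fun d => (c :: t).contains d) = pl.filter (fun d => t.contains d) := by
        refine List.filter_congr (fun d hd => ?_)
        have hdc : ¬ (d == c) = true := fun h => hc (eq_of_beq h ▸ hd)
        simp only [List.contains_cons]
        rw [Bool.eq_false_iff.mpr hdc, Bool.false_or]
      have hmap : (pl.filter (fun d => t.contains d)).map (fun d => ((c :: t).idxOf d : Int))
          = ((pl.filter (fun d => t.contains d)).map (fun d => (t.idxOf d : Int))).map
              (fun x => x + 1) := by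
        rw [List.map_map]
        refine List.map_congr_left (fun d hd => ?_)
        have hdc : ¬ (c == d) = true := fun h =>
          hc (eq_of_beq h ▸ (List.mem_filter.mp hd).1)
        simp only [Function.comp, List.idxOf_cons, hdc, cond_false]
        push_cast; ring
      rw [hfil, hmap]
      have hshift := altGo_shift (PySem.Set.ofList pl) t 1
      have hstep : minIndexCharAltGo (PySem.Set.ofList pl) (c :: t) 0
          = minIndexCharAltGo (PySem.Set.ofList pl) t 1 := by
        simp only [minIndexCharAltGo]
        rw [if_neg hSc]
        norm_num
      cases hmin : PySem.List.min? ((pl.filter (fun d => t.contains d)).map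
          (fun d => (t.idxOf d : Int))) (fun x => x) with
      | none =>
        have hnil := (PySem.List.min?_eq_none_iff _ _).mp hmin
        rw [hnil] at ih ⊢
        simp only [List.length_nil, lt_irrefl, List.map_nil] at ih ⊢
        rw [hstep, hshift, ← ih]
        simp
      | some m =>
        have hmemP := PySem.List.min?_mem hmin
        obtain ⟨d, _, hdm⟩ := List.mem_map.mp hmemP
        have hm0 : 0 ≤ m := by rw [← hdm]; exact Int.natCast_nonneg _
        have hlenP : 0 < ((pl.filter (fun d => t.contains d)).map
            (fun d => (t.idxOf d : Int))).length :=
          List.length_pos_iff.mpr (List.ne_nil_of_mem hmemP)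
        rw [if_pos hlenP, hmin, Option.getD_some] at ih
        rw [if_pos (by simpa using hlenP), min?_map_add_one, hmin, Option.map_some,
          Option.getD_some, hstep, hshift, ← ih]
        rw [if_neg (by omega)]


-- ===== VERDICT (by name: the statement is the Claim_ definition above) =====
theorem minIndexChar_spec : Claim_equal_minIndexChar := by
  intro Str pat _
  unfold Spec_minIndexChar minIndexChar minIndexChar_alt
  rw [pA_eq]
  exact core_eq pat.toList Str.toList
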